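-- pv_equiv track=rewrite | github.com/vpunugupati/CodingPuzzles | LeetCode/PositionalElement.py | PositionalElements
-- ===== SOURCE A (Python) =====
-- def PositionalElements(matrix):
--     nRows= len(matrix)
--     nCount=0
--     for row in matrix:
--         for indexCol, element in enumerate(row):
--             if element==min(row) or element==max(row):
--                 if row.count(element)>1:
--                     return -1
--                 nCount=nCount+1
--             else:
--                 listColumn=[]
--
--                 for indexRow in range(0, nRows):
--                     listColumn.append(matrix[indexRow][indexCol])
--
--                 if element==min(listColumn) or element==max(listColumn):
--                     if listColumn.count(element)>1:
--                         return -1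
--                     nCount=nCount+1
--     return nCount
--
-- matrix = [[1,3,4],[5,2,9],[8,7,6]]
-- ===== SOURCE B (Python) =====
-- def PositionalElements(matrix):
--     rstats = [(min(r), max(r), r.count(min(r)), r.count(max(r))) if r else (0, 0, 0, 0)
--               for r in matrix]
--     ncols = max((len(r) for r in matrix), default=0)
--     cols = [[r[j] for r in matrix if j < len(r)] for j in range(ncols)]
--     cstats = [(min(c), max(c), c.count(min(c)), c.count(max(c))) for c in cols]
--     count = 0
--     for (rmn, rmx, rcmn, rcmx), row in zip(rstats, matrix):
--         for j, e in enumerate(row):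
--             if e == rmn or e == rmx:
--                 if (rcmn if e == rmn else rcmx) > 1:
--                     return -1
--                 count += 1
--             else:
--                 cmn, cmx, ccmn, ccmx = cstats[j]
--                 if e == cmn or e == cmx:
--                     if (ccmn if e == cmn else ccmx) > 1:
--                         return -1
--                     count += 1
--     return count
-- ===== Notes on version B (the rewrite author's own statement) =====
-- stated objective: faster
-- what changed: Precompute per-row and per-column (min, max, count-of-min, count-of-max) once, then decide each cell in O(1), instead of recomputing min/max/count of the row and rebuilding and rescanning the whole column for every cell.
-- outside the precondition, e.g. on PositionalElements([[1, 1, 3, 5], [2]]): A returns -1, B returns -1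
import Mathlib
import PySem

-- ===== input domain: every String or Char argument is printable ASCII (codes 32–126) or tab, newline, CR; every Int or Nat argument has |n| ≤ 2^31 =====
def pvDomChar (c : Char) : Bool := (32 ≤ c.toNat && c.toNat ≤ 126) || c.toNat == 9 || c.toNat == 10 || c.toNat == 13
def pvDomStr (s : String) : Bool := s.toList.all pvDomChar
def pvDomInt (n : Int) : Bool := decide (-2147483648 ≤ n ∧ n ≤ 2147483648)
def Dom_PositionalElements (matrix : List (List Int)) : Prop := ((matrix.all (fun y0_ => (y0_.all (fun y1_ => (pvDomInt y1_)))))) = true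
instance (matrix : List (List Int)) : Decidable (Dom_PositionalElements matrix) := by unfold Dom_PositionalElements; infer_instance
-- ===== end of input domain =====

-- B precomputes per-row and per-column (min, max, count(min), count(max)) once and decides
-- each cell in O(1), instead of A's per-cell min/max/count scans and column rebuilds.

-- ===== PORT A =====
-- listColumn build: for indexRow in range(0, nRows): listColumn.append(matrix[indexRow][indexCol])
-- (none = IndexError on a ragged matrix; excluded by Pre_)
def pvColBuild (matrix : List (List Int)) (nRows : Int) (j : Int) : Option (List Int) :=
  (PySem.List.pyRange 0 nRows 1).foldl
    (fun acc i =>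
      acc.bind (fun l =>
        (PySem.List.pyGet? matrix i).bind (fun r =>
          (PySem.List.pyGet? r j).map (fun x => l ++ [x]))))
    (some [])

-- inner 'for indexCol, element in enumerate(row)' loop; .error v = early 'return v'
def pvCellsA (matrix : List (List Int)) (nRows : Int) (row : List Int) :
    List (Int × Int) → Int → Option (Except Int Int)
  | [], cnt => some (.ok cnt)
  | (j, e) :: rest, cnt =>
    if PySem.List.min? row (fun x => x) = some e ∨ PySem.List.max? row (fun x => x) = some e then
      if PySem.List.count row e > 1 then some (.error (-1))
      else pvCellsA matrix nRows row rest (cnt + 1)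
    else
      match pvColBuild matrix nRows j with
      | none => none  -- IndexError (ragged matrix), excluded by Pre_
      | some listColumn =>
        if PySem.List.min? listColumn (fun x => x) = some e ∨
           PySem.List.max? listColumn (fun x => x) = some e then
          if PySem.List.count listColumn e > 1 then some (.error (-1))
          else pvCellsA matrix nRows row rest (cnt + 1)
        else pvCellsA matrix nRows row rest cnt

-- outer 'for row in matrix' loop
def pvRowsA (matrix : List (List Int)) (nRows : Int) :
    List (List Int) → Int → Option Int
  | [], cnt => some cnt
  | row :: rest, cnt =>
    match pvCellsA matrix nRows row (PySem.List.enumerate row 0) cnt with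
    | none => none
    | some (.error v) => some v
    | some (.ok c) => pvRowsA matrix nRows rest c

def PositionalElements (matrix : List (List Int)) : Int :=
  match pvRowsA matrix (matrix.length : Int) matrix 0 with
  | some v => v
  | none => 0  -- IndexError in Python (ragged matrix); unreachable under Pre_

-- ===== PORT B =====
-- (min(l), max(l), l.count(min(l)), l.count(max(l))) if l else (0, 0, 0, 0)
def pvStat (l : List Int) : Int × Int × Nat × Nat :=
  match PySem.List.min? l (fun x => x), PySem.List.max? l (fun x => x) with
  | some mn, some mx => (mn, mx, PySem.List.count l mn, PySem.List.count l mx)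
  | _, _ => (0, 0, 0, 0)

-- ncols = max((len(r) for r in matrix), default=0)
def pvNcols (matrix : List (List Int)) : Int :=
  (PySem.List.max? (matrix.map (fun r => (r.length : Int))) (fun x => x)).getD 0

-- cols = [[r[j] for r in matrix if j < len(r)] for j in range(ncols)]
def pvColsB (matrix : List (List Int)) : List (List Int) :=
  (PySem.List.pyRange 0 (pvNcols matrix) 1).map
    (fun j => (matrix.filter (fun r => decide (j < (r.length : Int)))).map
      (fun r => PySem.List.pyGetD r j 0))  -- r[j]; in range, the filter guarantees it

-- inner loop of B: O(1) per cell, from the precomputed stats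
def pvCellsB (rstat : Int × Int × Nat × Nat) (cstats : List (Int × Int × Nat × Nat)) :
    List (Int × Int) → Int → Except Int Int
  | [], cnt => .ok cnt
  | (j, e) :: rest, cnt =>
    if e = rstat.1 ∨ e = rstat.2.1 then
      if (if e = rstat.1 then rstat.2.2.1 else rstat.2.2.2) > 1 then .error (-1)
      else pvCellsB rstat cstats rest (cnt + 1)
    else
      let c := PySem.List.pyGetD cstats j (0, 0, 0, 0)  -- cstats[j]; j in range under Pre_
      if e = c.1 ∨ e = c.2.1 then
        if (if e = c.1 then c.2.2.1 else c.2.2.2) > 1 then .error (-1)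
        else pvCellsB rstat cstats rest (cnt + 1)
      else pvCellsB rstat cstats rest cnt

-- outer loop of B over zip(rstats, matrix)
def pvRowsB (cstats : List (Int × Int × Nat × Nat)) :
    List ((Int × Int × Nat × Nat) × List Int) → Int → Except Int Int
  | [], cnt => .ok cnt
  | (st, row) :: rest, cnt =>
    match pvCellsB st cstats (PySem.List.enumerate row 0) cnt with
    | .error v => .error v
    | .ok c => pvRowsB cstats rest c

def PositionalElements_alt (matrix : List (List Int)) : Int :=
  let rstats := matrix.map pvStat
  let cstats := (pvColsB matrix).map pvStat
  match pvRowsB cstats (rstats.zip matrix) 0 with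
  | .error v => v
  | .ok c => c

-- ===== PRECONDITION & SPEC =====
-- Pre_ excludes matrices in which some entry strictly between its row's min and max sits in
-- a column that some other row lacks: there A's column scan raises IndexError when reached
-- (on a few such inputs A still returns, having hit an earlier duplicated extremum and
-- returned -1 before the crash). On rectangular matrices Pre_ always holds.
def Pre_PositionalElements (matrix : List (List Int)) : Prop :=
  ∀ r ∈ matrix, ∀ (j : Nat), j < r.length →
    ((∃ x ∈ r, x < r.getD j 0) ∧ (∃ x ∈ r, r.getD j 0 < x)) →
    ∀ r' ∈ matrix, j < r'.length
instance (matrix : List (List Int)) : Decidable (Pre_PositionalElements matrix) := by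
  unfold Pre_PositionalElements; infer_instance
def pvWitness_PositionalElements : List (List Int) := [[1,3,4],[5,2,9],[8,7,6]]

def Spec_PositionalElements (matrix : List (List Int)) (out : Int) : Prop := out = PositionalElements_alt matrix
instance (matrix : List (List Int)) (out : Int) : Decidable (Spec_PositionalElements matrix out) := by unfold Spec_PositionalElements; infer_instance

-- ===== CLAIM (what is proved, stated in full; the proofs are below) =====
def Claim_equal_PositionalElements : Prop := ∀ (matrix : List (List Int)), Dom_PositionalElements matrix → Pre_PositionalElements matrix → Spec_PositionalElements matrix (PositionalElements matrix)

-- ===== LEMMAS AND PROOFS =====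
-- collapse of the final 'match' both top-levels perform on the loop result
def pvOut : Except Int Int → Int
  | .error v => v
  | .ok c => c

-- the full column at index j (what A builds cell by cell when every row is long enough)
def pvCol (matrix : List (List Int)) (j : Int) : List Int :=
  matrix.map (fun r => PySem.List.pyGetD r j 0)

lemma pvStat_eq (l : List Int) (mn mx : Int)
    (hmn : PySem.List.min? l (fun x => x) = some mn)
    (hmx : PySem.List.max? l (fun x => x) = some mx) :
    pvStat l = (mn, mx, PySem.List.count l mn, PySem.List.count l mx) := by
  simp [pvStat, hmn, hmx]

lemma pvMin_some_iff (r : List Int) (e : Int) (he : e ∈ r) :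
    PySem.List.min? r (fun x => x) = some e ↔ ∀ x ∈ r, e ≤ x := by
  constructor
  · intro h x hx
    exact PySem.List.min?_isMin h x hx
  · intro h
    cases hmn : PySem.List.min? r (fun x => x) with
    | none =>
      exact absurd ((PySem.List.min?_eq_none_iff r _).mp hmn) (by rintro rfl; simp at he)
    | some mn =>
      have h1 : mn ≤ e := PySem.List.min?_isMin hmn e he
      have h2 : e ≤ mn := h mn (PySem.List.min?_mem hmn)
      rw [le_antisymm h1 h2]

lemma pvMax_some_iff (r : List Int) (e : Int) (he : e ∈ r) :
    PySem.List.max? r (fun x => x) = some e ↔ ∀ x ∈ r, x ≤ e := by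
  constructor
  · intro h x hx
    exact PySem.List.max?_isMax h x hx
  · intro h
    cases hmx : PySem.List.max? r (fun x => x) with
    | none =>
      exact absurd ((PySem.List.max?_eq_none_iff r _).mp hmx) (by rintro rfl; simp at he)
    | some mx =>
      have h1 : e ≤ mx := PySem.List.max?_isMax hmx e he
      have h2 : mx ≤ e := h mx (PySem.List.max?_mem hmx)
      rw [le_antisymm h2 h1]

lemma pvLen_le_ncols (matrix : List (List Int)) (r : List Int) (hr : r ∈ matrix) :
    (r.length : Int) ≤ pvNcols matrix := by
  unfold pvNcols
  cases h : PySem.List.max? (matrix.map (fun r => (r.length : Int))) (fun x => x) with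
  | none =>
    have := (PySem.List.max?_eq_none_iff _ _).mp h
    rw [List.map_eq_nil_iff] at this
    exact absurd hr (by rw [this]; simp)
  | some m =>
    have := PySem.List.max?_isMax h ((r.length : Int)) (List.mem_map_of_mem hr)
    simpa using this

lemma pvColBuild_fold (matrix : List (List Int)) (j : Int) (hj : 0 ≤ j)
    (hall : ∀ r ∈ matrix, j < (r.length : Int)) :
    ∀ (m k : Nat) (l : List Int), matrix.length - k = m →
      (PySem.List.pyRange (k : Int) (matrix.length : Int) 1).foldl
        (fun acc i =>
          acc.bind (fun l =>
            (PySem.List.pyGet? matrix i).bind (fun r =>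
              (PySem.List.pyGet? r j).map (fun x => l ++ [x])))) (some l)
      = some (l ++ (matrix.drop k).map (fun r => PySem.List.pyGetD r j 0)) := by
  intro m
  induction m with
  | zero =>
    intro k l hm
    have hk : matrix.length ≤ k := by omega
    rw [PySem.List.pyRange_one_eq_nil (by exact_mod_cast hk), List.drop_eq_nil_of_le hk]
    simp
  | succ m ih =>
    intro k l hm
    have hk : k < matrix.length := by omega
    have hjr : j.toNat < (matrix[k]).length := by
      have := hall matrix[k] (List.getElem_mem hk)
      omega
    rw [PySem.List.pyRange_one_cons (by exact_mod_cast hk)]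
    rw [List.foldl_cons]
    rw [show ((k : Int) + 1) = ((k + 1 : Nat) : Int) by push_cast; ring]
    rw [List.drop_eq_getElem_cons hk]
    have hr : PySem.List.pyGet? matrix[k] j = some (matrix[k][j.toNat]) := by
      rw [PySem.List.pyGet?_of_nonneg _ hj, List.getElem?_eq_getElem hjr]
    simp only [Option.bind_some, PySem.List.pyGet?_ofNat matrix k hk, hr, Option.map_some]
    rw [ih (k + 1) (l ++ [matrix[k][j.toNat]]) (by omega)]
    have hf : PySem.List.pyGetD matrix[k] j 0 = matrix[k][j.toNat] := by
      unfold PySem.List.pyGetD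
      rw [hr]
      rfl
    simp only [List.map_cons, hf]
    simp

lemma pvColBuild_eq (matrix : List (List Int)) (j : Int) (hj : 0 ≤ j)
    (hall : ∀ r ∈ matrix, j < (r.length : Int)) :
    pvColBuild matrix (matrix.length : Int) j = some (pvCol matrix j) := by
  have := pvColBuild_fold matrix j hj hall matrix.length 0 [] (by omega)
  simpa [pvColBuild, pvCol] using this

lemma pvCond_iff (l : List Int) (e : Int) :
    (PySem.List.min? l (fun x => x) = some e ∨ PySem.List.max? l (fun x => x) = some e)
    ↔ (e = (pvStat l).1 ∨ e = (pvStat l).2.1) ∧ l ≠ [] := by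
  by_cases hl : l = []
  · subst hl
    have h1 : PySem.List.min? ([] : List Int) (fun x => x) = none :=
      (PySem.List.min?_eq_none_iff _ _).mpr rfl
    have h2 : PySem.List.max? ([] : List Int) (fun x => x) = none :=
      (PySem.List.max?_eq_none_iff _ _).mpr rfl
    simp [h1, h2]
  · obtain ⟨mn, hmn⟩ : ∃ mn, PySem.List.min? l (fun x => x) = some mn := by
      cases h : PySem.List.min? l (fun x => x) with
      | none => exact absurd ((PySem.List.min?_eq_none_iff l _).mp h) hl
      | some mn => exact ⟨mn, rfl⟩
    obtain ⟨mx, hmx⟩ : ∃ mx, PySem.List.max? l (fun x => x) = some mx := by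
      cases h : PySem.List.max? l (fun x => x) with
      | none => exact absurd ((PySem.List.max?_eq_none_iff l _).mp h) hl
      | some mx => exact ⟨mx, rfl⟩
    rw [pvStat_eq l mn mx hmn hmx, hmn, hmx]
    simp only [Option.some.injEq]
    constructor
    · rintro (rfl | rfl)
      · exact ⟨Or.inl rfl, hl⟩
      · exact ⟨Or.inr rfl, hl⟩
    · rintro ⟨rfl | rfl, -⟩
      · exact Or.inl rfl
      · exact Or.inr rfl

lemma pvDup_eq (l : List Int) (e : Int)
    (hcond : PySem.List.min? l (fun x => x) = some e ∨ PySem.List.max? l (fun x => x) = some e) :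
    PySem.List.count l e
      = (if e = (pvStat l).1 then (pvStat l).2.2.1 else (pvStat l).2.2.2) := by
  rcases hmn : PySem.List.min? l (fun x => x) with _ | mn
  · have hl := (PySem.List.min?_eq_none_iff l _).mp hmn
    subst hl
    have h2 : PySem.List.max? ([] : List Int) (fun x => x) = none :=
      (PySem.List.max?_eq_none_iff _ _).mpr rfl
    rw [hmn, h2] at hcond
    simp at hcond
  · rcases hmx : PySem.List.max? l (fun x => x) with _ | mx
    · have hl := (PySem.List.max?_eq_none_iff l _).mp hmx
      subst hl
      have h1 : PySem.List.min? ([] : List Int) (fun x => x) = none :=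
        (PySem.List.min?_eq_none_iff _ _).mpr rfl
      rw [h1] at hmn; exact absurd hmn (by simp)
    · rw [pvStat_eq l mn mx hmn hmx]
      by_cases he : e = mn
      · subst he; simp
      · simp only [he, if_false]
        rcases hcond with h | h
        · rw [hmn] at h; exact absurd h.symm (by simpa using he)
        · rw [hmx] at h
          obtain rfl : mx = e := by simpa using h
          rfl

lemma pvCells_eq (matrix : List (List Int)) (hpre : Pre_PositionalElements matrix)
    (row : List Int) (hrowmem : row ∈ matrix) :
    ∀ (ps : List (Int × Int)) (cnt : Int),
      (∀ p ∈ ps, ∃ (k : Nat) (_ : k < row.length), p = ((k : Int), row[k])) →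
      pvCellsA matrix (matrix.length : Int) row ps cnt
        = some (pvCellsB (pvStat row) ((pvColsB matrix).map pvStat) ps cnt) := by
  intro ps
  induction ps with
  | nil => intro cnt _; simp [pvCellsA, pvCellsB]
  | cons p rest ih =>
    intro cnt hps
    obtain ⟨k, hk, rfl⟩ := hps p (List.mem_cons_self)
    have hrest : ∀ p ∈ rest, ∃ (k : Nat) (_ : k < row.length), p = ((k : Int), row[k]) :=
      fun p hp => hps p (List.mem_cons_of_mem _ hp)
    have hrowne : row ≠ [] := by
      intro h
      rw [h] at hk
      simp at hk
    have hemem : row[k] ∈ row := List.getElem_mem hk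
    rw [pvCellsA, pvCellsB]
    by_cases hcA : PySem.List.min? row (fun x => x) = some row[k] ∨
        PySem.List.max? row (fun x => x) = some row[k]
    · have hcB : (row[k] = (pvStat row).1 ∨ row[k] = (pvStat row).2.1) :=
        ((pvCond_iff row row[k]).mp hcA).1
      rw [if_pos hcA, if_pos hcB, pvDup_eq row row[k] hcA]
      split_ifs <;> first | rfl | exact ih (cnt + 1) hrest
    · have hcB : ¬ (row[k] = (pvStat row).1 ∨ row[k] = (pvStat row).2.1) := by
        intro h
        exact hcA ((pvCond_iff row row[k]).mpr ⟨h, hrowne⟩)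
      rw [if_neg hcA]
      push Not at hcA
      obtain ⟨hnmin, hnmax⟩ := hcA
      have hmid : (∃ x ∈ row, x < row.getD k 0) ∧ (∃ x ∈ row, row.getD k 0 < x) := by
        rw [List.getD_eq_getElem row 0 hk]
        constructor
        · by_contra h
          push Not at h
          exact hnmin ((pvMin_some_iff row row[k] hemem).mpr (fun x hx => h x hx))
        · by_contra h
          push Not at h
          exact hnmax ((pvMax_some_iff row row[k] hemem).mpr (fun x hx => h x hx))
      have hall : ∀ r' ∈ matrix, k < r'.length := hpre row hrowmem k hk hmid
      have hallInt : ∀ r' ∈ matrix, ((k : Int)) < (r'.length : Int) := by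
        intro r' hr'
        exact_mod_cast hall r' hr'
      rw [pvColBuild_eq matrix (k : Int) (by positivity) hallInt]
      have hkn : ((k : Int)) < pvNcols matrix := by
        have h1 := pvLen_le_ncols matrix row hrowmem
        have h2 : ((k : Int)) < (row.length : Int) := by exact_mod_cast hk
        omega
      have hfilter : matrix.filter (fun r => decide ((k : Int) < (r.length : Int))) = matrix :=
        List.filter_eq_self.mpr (fun r hr => by simpa using hallInt r hr)
      have hcstat : PySem.List.pyGetD ((pvColsB matrix).map pvStat) (k : Int) (0, 0, 0, 0)
          = pvStat (pvCol matrix (k : Int)) := by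
        rw [pvColsB, List.map_map]
        rw [PySem.List.pyGetD_map_pyRange_of_nonneg _ _ _ _ (by positivity) hkn]
        simp only [Function.comp]
        rw [hfilter]
        rfl
      have hcolne : pvCol matrix (k : Int) ≠ [] := by
        rcases matrix with _ | ⟨r, rs⟩
        · exact absurd hrowmem (by simp)
        · simp [pvCol]
      simp only [if_neg hcB, hcstat]
      by_cases hcolA : PySem.List.min? (pvCol matrix (k : Int)) (fun x => x) = some row[k] ∨
          PySem.List.max? (pvCol matrix (k : Int)) (fun x => x) = some row[k]
      · have hcolB : (row[k] = (pvStat (pvCol matrix (k : Int))).1 ∨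
            row[k] = (pvStat (pvCol matrix (k : Int))).2.1) :=
          ((pvCond_iff _ row[k]).mp hcolA).1
        rw [if_pos hcolA, if_pos hcolB, pvDup_eq _ row[k] hcolA]
        split_ifs <;> first | rfl | exact ih (cnt + 1) hrest
      · have hcolB : ¬ (row[k] = (pvStat (pvCol matrix (k : Int))).1 ∨
            row[k] = (pvStat (pvCol matrix (k : Int))).2.1) := by
          intro h
          exact hcolA ((pvCond_iff _ row[k]).mpr ⟨h, hcolne⟩)
        rw [if_neg hcolA, if_neg hcolB]
        exact ih cnt hrest

lemma pvRows_eq (matrix : List (List Int)) (hpre : Pre_PositionalElements matrix) :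
    ∀ (rows : List (List Int)) (cnt : Int), (∀ r ∈ rows, r ∈ matrix) →
      pvRowsA matrix (matrix.length : Int) rows cnt
        = some (pvOut (pvRowsB ((pvColsB matrix).map pvStat) ((rows.map pvStat).zip rows) cnt)) := by
  intro rows
  induction rows with
  | nil => intro cnt _; simp [pvRowsA, pvRowsB, pvOut]
  | cons row rest ih =>
    intro cnt hmem
    have hrowmem : row ∈ matrix := hmem row (List.mem_cons_self)
    have hps : ∀ p ∈ PySem.List.enumerate row 0,
        ∃ (k : Nat) (_ : k < row.length), p = ((k : Int), row[k]) := by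
      intro p hp
      obtain ⟨k, hk, rfl⟩ := (PySem.List.mem_enumerate_iff row 0 p).mp hp
      exact ⟨k, hk, by simp⟩
    rw [pvRowsA, List.map_cons, List.zip_cons_cons, pvRowsB,
      pvCells_eq matrix hpre row hrowmem (PySem.List.enumerate row 0) cnt hps]
    rcases pvCellsB (pvStat row) ((pvColsB matrix).map pvStat)
        (PySem.List.enumerate row 0) cnt with v | c
    · rfl
    · exact ih c (fun r hr => hmem r (List.mem_cons_of_mem _ hr))

-- ===== VERDICT (by name: the statement is the Claim_ definition above) =====
theorem PositionalElements_spec : Claim_equal_PositionalElements := by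
  intro matrix _ hpre
  unfold Spec_PositionalElements
  unfold PositionalElements
  rw [pvRows_eq matrix hpre matrix 0 (fun r hr => hr)]
  change pvOut (pvRowsB ((pvColsB matrix).map pvStat) ((matrix.map pvStat).zip matrix) 0)
    = (match pvRowsB ((pvColsB matrix).map pvStat) ((matrix.map pvStat).zip matrix) 0 with
       | Except.error v => v
       | Except.ok c => c)
  rcases pvRowsB ((pvColsB matrix).map pvStat) ((matrix.map pvStat).zip matrix) 0 with v | c <;> rfl
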